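-- pv_equiv track=rewrite | github.com/anniebryan/advent-of-code-19 | 2020/day20/day20.py | get_tile_image
-- ===== SOURCE A (Python) =====
-- def remove_border(tiles, tile):
--     tile_id = tile[0]
--     values = tiles[tile_id]
--     return [row[1:-1] for row in values[1:-1]]
--
-- def get_tile_image(tiles, tile, borderless):
--     tile_id, rotation, flipped = tile
--     tile_image = remove_border(tiles, tile) if borderless else tiles[tile_id]
--     width = len(tile_image)
--
--     if flipped: tile_image = [row[::-1] for row in tile_image]
--
--     if rotation == 0: return tile_image
--     elif rotation == 1: return [''.join(tile_image[width-j-1][i] for j in range(width)) for i in range(width)]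
--     elif rotation == 2: return [row[::-1] for row in tile_image[::-1]]
--     else: return [''.join(tile_image[j][width-i-1] for j in range(width)) for i in range(width)]
-- ===== SOURCE B (Python) =====
-- def get_tile_image(tiles, tile, borderless):
--     tile_id, rotation, flipped = tile
--     img = tiles[tile_id]
--     if borderless:
--         img = [row[1:-1] for row in img[1:-1]]
--     if flipped:
--         img = [row[::-1] for row in img]
--     if rotation != 0 and rotation != 2:  # quarter turn (rotation 1, and the 3/else case)
--         img = [''.join(row[i] for row in reversed(img)) for i in range(len(img))]
--     if rotation != 0 and rotation != 1:  # half turn (rotation 2, and the 3/else case)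
--         img = [row[::-1] for row in reversed(img)]
--     return img
-- ===== Notes on version B (the rewrite author's own statement) =====
-- stated objective: alternative
-- what changed: A's four explicit rotation branches (identity, two index comprehensions and a double reverse) are replaced by composing at most two primitive turns: one quarter-turn helper built by joining columns of the reversed row list, applied when rotation is not 0 or 2, followed by a half turn (reverse rows and each row) when rotation is not 0 or 1.
import Mathlib
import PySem

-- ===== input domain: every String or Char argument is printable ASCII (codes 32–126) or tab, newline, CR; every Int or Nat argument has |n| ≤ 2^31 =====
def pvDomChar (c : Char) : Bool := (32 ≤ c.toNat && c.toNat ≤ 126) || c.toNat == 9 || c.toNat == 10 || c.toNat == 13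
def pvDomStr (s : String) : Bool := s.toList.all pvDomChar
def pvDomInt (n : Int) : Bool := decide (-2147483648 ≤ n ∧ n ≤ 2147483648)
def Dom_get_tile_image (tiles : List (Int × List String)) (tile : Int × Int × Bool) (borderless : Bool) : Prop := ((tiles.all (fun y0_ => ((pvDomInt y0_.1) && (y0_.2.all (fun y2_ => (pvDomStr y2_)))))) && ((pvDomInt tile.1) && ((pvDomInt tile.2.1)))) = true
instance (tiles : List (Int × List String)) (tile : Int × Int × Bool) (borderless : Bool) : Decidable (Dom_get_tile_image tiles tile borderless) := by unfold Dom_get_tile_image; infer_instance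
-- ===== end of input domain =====

-- B replaces A's four explicit rotation branches by composing at most two primitive turns
-- (a quarter turn built from the reversed row list, then a half turn); same cost, different decomposition.

-- ===== PORT A =====
-- tiles[tile_id] on the dict → first-match lookup; the KeyError case is excluded by Pre_ (getD [] is never reached there)
def remove_border (tiles : List (Int × List String)) (tile : Int × Int × Bool) : List String :=
  let values := (tiles.lookup tile.1).getD []
  (PySem.List.slice values (some 1) (some (-1))).map (fun row => PySem.Str.slice row (some 1) (some (-1)))

-- ''.join over a generator of single chars → String.ofList; row[::-1] / xs[::-1] → reverse (PySem.Str/List.slice?_none_none_neg_one);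
-- out-of-range character indexing (Python IndexError) is excluded by Pre_ (.getD defaults are never reached there)
def get_tile_image (tiles : List (Int × List String)) (tile : Int × Int × Bool) (borderless : Bool) : List String :=
  let tile_id := tile.1
  let rotation := tile.2.1
  let flipped := tile.2.2
  let tile_image0 := if borderless then remove_border tiles tile else (tiles.lookup tile_id).getD []
  let width : Int := PySem.List.len tile_image0
  let tile_image := if flipped then tile_image0.map (fun row => String.ofList row.toList.reverse) else tile_image0
  if rotation = 0 then tile_image
  else if rotation = 1 then
    (PySem.List.pyRange 0 width).map (fun i =>
      String.ofList ((PySem.List.pyRange 0 width).map (fun j =>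
        (PySem.Str.pyGet? ((PySem.List.pyGet? tile_image (width - j - 1)).getD "") i).getD ' ')))
  else if rotation = 2 then
    tile_image.reverse.map (fun row => String.ofList row.toList.reverse)
  else
    (PySem.List.pyRange 0 width).map (fun i =>
      String.ofList ((PySem.List.pyRange 0 width).map (fun j =>
        (PySem.Str.pyGet? ((PySem.List.pyGet? tile_image j).getD "") (width - i - 1)).getD ' ')))

-- ===== PORT B =====
-- ''.join(row[i] for row in reversed(img)) for i in range(len(img))  — one quarter turn
def rot90_alt (img : List String) : List String :=
  (PySem.List.pyRange 0 (PySem.List.len img)).map (fun i =>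
    String.ofList (img.reverse.map (fun row => (PySem.Str.pyGet? row i).getD ' ')))

def get_tile_image_alt (tiles : List (Int × List String)) (tile : Int × Int × Bool) (borderless : Bool) : List String :=
  let tile_id := tile.1
  let rotation := tile.2.1
  let flipped := tile.2.2
  let img0 := (tiles.lookup tile_id).getD []
  let img1 := if borderless then (PySem.List.slice img0 (some 1) (some (-1))).map (fun row => PySem.Str.slice row (some 1) (some (-1))) else img0
  let img2 := if flipped then img1.map (fun row => String.ofList row.toList.reverse) else img1
  let img3 := if rotation ≠ 0 ∧ rotation ≠ 2 then rot90_alt img2 else img2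
  if rotation ≠ 0 ∧ rotation ≠ 1 then img3.reverse.map (fun row => String.ofList row.toList.reverse) else img3

-- ===== PRECONDITION & SPEC =====
-- Exactly the inputs on which Python A returns: the tile id is a key of tiles (else KeyError), and for a
-- rotation other than 0/2 (which index characters) every row of the selected image is at least as long as
-- the image is high (else IndexError). B raises in Python on exactly the same inputs.
def Pre_get_tile_image (tiles : List (Int × List String)) (tile : Int × Int × Bool) (borderless : Bool) : Prop :=
  (tiles.lookup tile.1).isSome = true ∧
  (tile.2.1 = 0 ∨ tile.2.1 = 2 ∨
    (let v := (tiles.lookup tile.1).getD []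
     let img := if borderless then v.tail.dropLast.map (fun r => r.toList.tail.dropLast) else v.map String.toList
     ∀ row ∈ img, img.length ≤ row.length))
instance (tiles : List (Int × List String)) (tile : Int × Int × Bool) (borderless : Bool) : Decidable (Pre_get_tile_image tiles tile borderless) := by unfold Pre_get_tile_image; infer_instance

def pvWitness_get_tile_image : (List (Int × List String)) × (Int × Int × Bool) × Bool :=
  ([(0, ["ab", "cd"])], (0, 1, false), false)

def Spec_get_tile_image (tiles : List (Int × List String)) (tile : Int × Int × Bool) (borderless : Bool) (out : List String) : Prop := out = get_tile_image_alt tiles tile borderless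
instance (tiles : List (Int × List String)) (tile : Int × Int × Bool) (borderless : Bool) (out : List String) : Decidable (Spec_get_tile_image tiles tile borderless out) := by unfold Spec_get_tile_image; infer_instance

-- ===== CLAIM (what is proved, stated in full; the proofs are below) =====
def Claim_equal_get_tile_image : Prop := ∀ (tiles : List (Int × List String)) (tile : Int × Int × Bool) (borderless : Bool), Dom_get_tile_image tiles tile borderless → Pre_get_tile_image tiles tile borderless → Spec_get_tile_image tiles tile borderless (get_tile_image tiles tile borderless)

-- ===== LEMMAS AND PROOFS =====

-- A's reversed-index comprehension  [f(xs[n-j-1]) for j in range(n)]  is the map over the reversed list.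
theorem map_pyRange_rev {α β : Type} (n : Nat) (xs : List α) (h : xs.length = n) (d : α) (f : α → β) :
    (PySem.List.pyRange 0 (n : Int)).map (fun j => f ((PySem.List.pyGet? xs ((n : Int) - j - 1)).getD d)) =
      xs.reverse.map f := by
  subst h
  rw [PySem.List.pyRange_zero_natCast, List.map_map]
  apply List.ext_getElem
  · simp
  · intro k h1 h2
    simp only [List.length_map, List.length_range] at h1
    have hidx : ((xs.length : Int) - (k : Int) - 1) = ((xs.length - 1 - k : Nat) : Int) := by omega
    simp [hidx, PySem.List.pyGet?_natCast, List.getElem_reverse,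
      List.getElem?_eq_getElem (show xs.length - 1 - k < xs.length by omega)]

-- A's straight-index comprehension  [f(xs[j]) for j in range(n)]  is the plain map.
theorem map_pyRange_idx {α β : Type} (n : Nat) (xs : List α) (h : xs.length = n) (d : α) (f : α → β) :
    (PySem.List.pyRange 0 (n : Int)).map (fun j => f ((PySem.List.pyGet? xs j).getD d)) = xs.map f := by
  subst h
  rw [PySem.List.pyRange_zero_natCast, List.map_map]
  apply List.ext_getElem
  · simp
  · intro k h1 h2
    simp only [List.length_map, List.length_range] at h1
    simp [PySem.List.pyGet?_natCast, List.getElem?_eq_getElem h1]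

-- ===== VERDICT (by name: the statement is the Claim_ definition above) =====
theorem get_tile_image_spec : Claim_equal_get_tile_image := by
  intro tiles tile borderless _ _
  obtain ⟨tid, rot, fl⟩ := tile
  show get_tile_image _ _ _ = _
  simp only [get_tile_image, get_tile_image_alt, remove_border]
  set img0 : List String :=
    if borderless then (PySem.List.slice ((tiles.lookup tid).getD []) (some 1) (some (-1))).map
        (fun row => PySem.Str.slice row (some 1) (some (-1)))
      else (tiles.lookup tid).getD [] with himg0
  set img : List String := if fl then img0.map (fun row => String.ofList row.toList.reverse) else img0 with himg
  have hlen : img.length = img0.length := by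
    rw [himg]; split <;> simp
  have hw : PySem.List.len img0 = (img.length : Int) := by
    simp [PySem.List.len, hlen]
  by_cases h0 : rot = 0
  · simp [h0]
  by_cases h1 : rot = 1
  · -- quarter turn only
    simp only [h1, if_neg (by decide : ¬(1 : Int) = 0), rot90_alt,
      if_neg (show ¬((1:Int) ≠ 0 ∧ (1:Int) ≠ 1) by simp), if_pos (show (1:Int) ≠ 0 ∧ (1:Int) ≠ 2 by constructor <;> decide)]
    rw [hw]
    refine List.map_congr_left (fun i _ => ?_)
    rw [map_pyRange_rev img.length img rfl "" (fun row => (PySem.Str.pyGet? row i).getD ' ')]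
  by_cases h2 : rot = 2
  · -- half turn only
    simp [h2]
  · -- the else branch (rotation 3 and anything else): quarter turn then half turn
    simp only [if_neg h0, if_neg h1, if_neg h2, if_pos (show rot ≠ 0 ∧ rot ≠ 2 from ⟨h0, h2⟩),
      if_pos (show rot ≠ 0 ∧ rot ≠ 1 from ⟨h0, h1⟩), rot90_alt]
    have hw2 : PySem.List.len img = (img.length : Int) := by simp [PySem.List.len]
    rw [hw, hw2]
    have hL : (PySem.List.pyRange 0 (img.length : Int)).map (fun i =>
          String.ofList ((PySem.List.pyRange 0 (img.length : Int)).map (fun j =>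
            (PySem.Str.pyGet? ((PySem.List.pyGet? img j).getD "") ((img.length : Int) - i - 1)).getD ' '))) =
        (PySem.List.pyRange 0 (img.length : Int)).map (fun i =>
          String.ofList (img.map (fun row => (PySem.Str.pyGet? row ((img.length : Int) - i - 1)).getD ' '))) :=
      List.map_congr_left (fun i _ => by
        rw [map_pyRange_idx img.length img rfl ""
          (fun row => (PySem.Str.pyGet? row ((img.length : Int) - i - 1)).getD ' ')])
    rw [hL]
    simp only [PySem.List.pyRange_zero_natCast, List.map_map]
    apply List.ext_getElem
    · simp
    · intro k hk1 hk2
      simp only [List.length_map, List.length_range] at hk1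
      have hidxk : ((img.length : Int) - ((k : Nat) : Int) - 1) = ((img.length - 1 - k : Nat) : Int) := by
        omega
      simp [List.getElem_reverse, hidxk, List.map_reverse]
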